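-- pv_equiv track=rewrite | github.com/FernE047/pythonscript | image_projects/morph_projects/manual_config/old_versions/generate_config_v7.py | ordenaLinhaIt
-- ===== SOURCE A (Python) =====
-- from enum import Enum
--
-- CoordData = tuple[int, int]
--
-- class Direction(Enum):
--     DOWN_RIGHT = 0
--     DOWN = 1
--     DOWN_LEFT = 2
--     LEFT = 3
--     UP_LEFT = 4
--     UP = 5
--     UP_RIGHT = 6
--     RIGHT = 7
--
-- def apply_direction(coord: CoordData | None, direction: Direction) -> CoordData:
--     if coord is None:
--         raise ValueError("Coordinate cannot be None")
--     x, y = coord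
--     if direction == Direction.DOWN_RIGHT:
--         return (x + 1, y + 1)
--     if direction == Direction.DOWN:
--         return (x, y + 1)
--     if direction == Direction.DOWN_LEFT:
--         return (x - 1, y + 1)
--     if direction == Direction.LEFT:
--         return (x - 1, y)
--     if direction == Direction.UP_LEFT:
--         return (x - 1, y - 1)
--     if direction == Direction.UP:
--         return (x, y - 1)
--     if direction == Direction.UP_RIGHT:
--         return (x + 1, y - 1)
--     if direction == Direction.RIGHT:
--         return (x + 1, y)
--
-- def ordenaLinhaIt(
--     linhaDesordenada: list[CoordData],
--     anteriores: list[CoordData] | None = None,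
--     inicio: CoordData | None = None,
-- ) -> list[CoordData]:
--     if inicio is None:
--         if anteriores is None:
--             inicio = linhaDesordenada[0]
--         else:
--             inicio = anteriores[0]
--     if anteriores is None:
--         anteriores = [inicio]
--     linhaOrdenada = anteriores.copy()
--     pontoInicial = anteriores[-1]
--     anteriores = None
--     while True:
--         pontos: list[CoordData] = []
--         for d in Direction:
--             pontoAtual = apply_direction(pontoInicial, d)
--             if pontoAtual in linhaDesordenada:
--                 if pontoAtual not in linhaOrdenada:
--                     pontos.append(pontoAtual)
--         if len(pontos) == 0:
--             return linhaOrdenada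
--         if len(pontos) == 1:
--             pontoInicial = pontos[0]
--             linhaOrdenada.append(pontoInicial)
--         else:
--             linhaMaxima = linhaOrdenada.copy()
--             for ponto in pontos:
--                 novaLinha = ordenaLinhaIt(
--                     linhaDesordenada, anteriores=linhaOrdenada + [ponto]
--                 )
--                 if len(novaLinha) > len(linhaMaxima):
--                     linhaMaxima = novaLinha.copy()
--             return linhaMaxima
-- ===== SOURCE B (Python) =====
-- def ordenaLinhaIt(
--     linhaDesordenada,
--     anteriores=None,
--     inicio=None,
-- ):
--     if anteriores is None:
--         anteriores = [linhaDesordenada[0] if inicio is None else inicio]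
--     return _dfs(linhaDesordenada, anteriores)
--
--
-- def _dfs(linhaDesordenada, caminho):
--     x, y = caminho[-1]
--     vizinhos = [
--         (x + 1, y + 1), (x, y + 1), (x - 1, y + 1), (x - 1, y),
--         (x - 1, y - 1), (x, y - 1), (x + 1, y - 1), (x + 1, y),
--     ]
--     candidatos = [
--         p for p in vizinhos
--         if p in linhaDesordenada and p not in caminho
--     ]
--     melhor = caminho
--     for p in candidatos:
--         nova = _dfs(linhaDesordenada, caminho + [p])
--         if len(nova) > len(melhor):
--             melhor = nova
--     return melhor
-- ===== Notes on version B (the rewrite author's own statement) =====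
-- stated objective: simpler
-- what changed: A's while-True loop with an inline fast path for degree-1 points plus recursion only at branch points is replaced by one uniform recursive DFS (_dfs) that extends the path by each candidate neighbour and keeps the strictly longer result; Pre_ excludes only the inputs where A raises IndexError (anteriores given but empty, or no start point at all on an empty line).
-- outside the precondition, e.g. on ordenaLinhaIt([], None, None): A raises IndexError, B raises IndexError; on ordenaLinhaIt([(0, 0)], [], None): A raises IndexError, B raises IndexError
import Mathlib
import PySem

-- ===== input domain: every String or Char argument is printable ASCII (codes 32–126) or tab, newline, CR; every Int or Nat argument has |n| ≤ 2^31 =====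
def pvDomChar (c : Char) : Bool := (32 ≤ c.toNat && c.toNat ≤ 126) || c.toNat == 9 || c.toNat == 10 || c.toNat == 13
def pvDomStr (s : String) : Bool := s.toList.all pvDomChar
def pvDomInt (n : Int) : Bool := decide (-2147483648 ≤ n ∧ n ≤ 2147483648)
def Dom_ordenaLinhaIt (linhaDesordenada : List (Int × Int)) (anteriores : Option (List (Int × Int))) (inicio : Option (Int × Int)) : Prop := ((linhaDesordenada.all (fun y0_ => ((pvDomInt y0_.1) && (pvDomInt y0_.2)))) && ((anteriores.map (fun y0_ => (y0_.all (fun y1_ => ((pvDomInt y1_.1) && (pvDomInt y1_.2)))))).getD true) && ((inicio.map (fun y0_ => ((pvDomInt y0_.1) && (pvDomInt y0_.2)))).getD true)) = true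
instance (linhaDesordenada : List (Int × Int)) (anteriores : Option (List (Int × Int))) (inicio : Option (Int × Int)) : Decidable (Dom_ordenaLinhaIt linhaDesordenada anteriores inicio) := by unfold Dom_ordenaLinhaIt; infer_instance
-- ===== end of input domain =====

-- B replaces A's while-loop with its inline degree-1 fast path by one uniform recursive DFS
-- that tracks the longest path; same values, same tie-breaking (objective: simpler).

-- ===== PORT A =====
-- Direction deltas, in the Enum's iteration order (DOWN_RIGHT … RIGHT); apply_direction adds the delta.
def pvDirsA : List (Int × Int) :=
  [(1, 1), (0, 1), (-1, 1), (-1, 0), (-1, -1), (0, -1), (1, -1), (1, 0)]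

-- the 'for d in Direction' loop building 'pontos' by appending
def pvPontosA (linhaDesordenada linhaOrdenada : List (Int × Int)) (pontoInicial : Int × Int) : List (Int × Int) :=
  pvDirsA.foldl (fun pontos d =>
    if linhaDesordenada.contains (pontoInicial.1 + d.1, pontoInicial.2 + d.2)
        && !linhaOrdenada.contains (pontoInicial.1 + d.1, pontoInicial.2 + d.2)
    then pontos ++ [(pontoInicial.1 + d.1, pontoInicial.2 + d.2)]
    else pontos) []

theorem pvPontosA_eq_filter (L ord : List (Int × Int)) (pt : Int × Int) :
    pvPontosA L ord pt =
      (pvDirsA.map (fun d => (pt.1 + d.1, pt.2 + d.2))).filter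
        (fun q => L.contains q && !ord.contains q) := by
  unfold pvPontosA
  rw [PySem.List.foldl_append_if (fun d => L.contains (pt.1 + d.1, pt.2 + d.2) && !ord.contains (pt.1 + d.1, pt.2 + d.2)) (fun d => (pt.1 + d.1, pt.2 + d.2)) pvDirsA []]
  rw [List.filter_map]
  rfl

theorem pv_mem_pontosA {L ord : List (Int × Int)} {pt q : Int × Int}
    (h : q ∈ pvPontosA L ord pt) : q ∈ L ∧ q ∉ ord := by
  rw [pvPontosA_eq_filter] at h
  have := List.of_mem_filter h
  simp only [Bool.and_eq_true, Bool.not_eq_true'] at this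
  exact ⟨by simpa using this.1, by simpa using this.2⟩

-- a new point strictly shrinks the set of still-unvisited occurrences (termination measure)
theorem pv_measure_lt (L ord : List (Int × Int)) {c : Int × Int}
    (hcL : c ∈ L) (hco : c ∉ ord) :
    (L.filter (fun x => !(ord ++ [c]).contains x)).length <
      (L.filter (fun x => !ord.contains x)).length := by
  have hsub : List.Sublist (L.filter (fun x => !(ord ++ [c]).contains x))
      (L.filter (fun x => !ord.contains x)) := by
    apply List.monotone_filter_right
    intro x hx
    simp only [Bool.not_eq_true', List.contains_append, Bool.or_eq_false_iff] at hx ⊢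
    exact hx.1
  have hcmem : c ∈ L.filter (fun x => !ord.contains x) :=
    List.mem_filter.mpr ⟨hcL, by simpa using hco⟩
  have hcnot : c ∉ L.filter (fun x => !(ord ++ [c]).contains x) := by
    intro hmem
    have := List.of_mem_filter hmem
    simp at this
  have hne : L.filter (fun x => !(ord ++ [c]).contains x) ≠
      L.filter (fun x => !ord.contains x) := fun h => hcnot (h ▸ hcmem)
  rcases Nat.lt_or_ge (L.filter (fun x => !(ord ++ [c]).contains x)).length
      (L.filter (fun x => !ord.contains x)).length with h1 | h1
  · exact h1
  · exact absurd (hsub.eq_of_length_le h1) hne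

-- the 'while True' loop of A; 'pontoInicial' is the last appended point
def pvLoopA (linhaDesordenada linhaOrdenada : List (Int × Int)) (pontoInicial : Int × Int) : List (Int × Int) :=
  match hp : pvPontosA linhaDesordenada linhaOrdenada pontoInicial with
  | [] => linhaOrdenada
  | [p] => pvLoopA linhaDesordenada (linhaOrdenada ++ [p]) p
  | p :: q :: rest =>
      -- the recursive call ordenaLinhaIt(L, anteriores=linhaOrdenada+[ponto]) re-runs the setup,
      -- which (anteriores nonempty) reduces exactly to pvLoopA L (linhaOrdenada+[ponto]) ponto
      let novas := (p :: q :: rest).attach.map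
        (fun c => pvLoopA linhaDesordenada (linhaOrdenada ++ [c.1]) c.1)
      novas.foldl (fun linhaMaxima nova =>
        if nova.length > linhaMaxima.length then nova else linhaMaxima) linhaOrdenada
termination_by (linhaDesordenada.filter (fun x => !linhaOrdenada.contains x)).length
decreasing_by
  · have h := pv_mem_pontosA (L := linhaDesordenada) (ord := linhaOrdenada) (pt := pontoInicial)
      (q := p) (by rw [hp]; exact List.mem_singleton_self p)
    exact pv_measure_lt _ _ h.1 h.2
  · have hc : c.1 ∈ pvPontosA linhaDesordenada linhaOrdenada pontoInicial := by
      rw [hp]; exact c.2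
    have h := pv_mem_pontosA hc
    exact pv_measure_lt _ _ h.1 h.2

def ordenaLinhaIt (linhaDesordenada : List (Int × Int)) (anteriores : Option (List (Int × Int))) (inicio : Option (Int × Int)) : List (Int × Int) :=
  let inicio2 : Option (Int × Int) :=
    match inicio with
    | some i => some i
    | none =>
      match anteriores with
      | none => PySem.List.pyGet? linhaDesordenada 0      -- linhaDesordenada[0]
      | some a => PySem.List.pyGet? a 0                   -- anteriores[0]
  let anteriores2 : List (Int × Int) :=
    match anteriores with
    | none => (match inicio2 with | some i => [i] | none => [])  -- none = IndexError, outside Pre_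
    | some a => a
  match PySem.List.pyGet? anteriores2 (-1) with            -- anteriores[-1]
  | none => []                                             -- IndexError, outside Pre_
  | some pt => pvLoopA linhaDesordenada anteriores2 pt

-- ===== PORT B =====
-- the literal 8-neighbour list of Source B
def pvVizinhosB (pt : Int × Int) : List (Int × Int) :=
  [(pt.1 + 1, pt.2 + 1), (pt.1, pt.2 + 1), (pt.1 - 1, pt.2 + 1), (pt.1 - 1, pt.2),
   (pt.1 - 1, pt.2 - 1), (pt.1, pt.2 - 1), (pt.1 + 1, pt.2 - 1), (pt.1 + 1, pt.2)]

theorem pv_mem_candB {L path : List (Int × Int)} {pt q : Int × Int}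
    (h : q ∈ (pvVizinhosB pt).filter (fun q => L.contains q && !path.contains q)) :
    q ∈ L ∧ q ∉ path := by
  have := List.of_mem_filter h
  simp only [Bool.and_eq_true, Bool.not_eq_true'] at this
  exact ⟨by simpa using this.1, by simpa using this.2⟩

-- _dfs of Source B: uniform recursion, keep the strictly longer result
def pvDfsB (linhaDesordenada caminho : List (Int × Int)) : List (Int × Int) :=
  match caminho.getLast? with
  | none => []                                             -- caminho[-1] = IndexError, outside Pre_
  | some pt =>
      let candidatos := (pvVizinhosB pt).filter
        (fun q => linhaDesordenada.contains q && !caminho.contains q)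
      let novas := candidatos.attach.map
        (fun c => pvDfsB linhaDesordenada (caminho ++ [c.1]))
      novas.foldl (fun melhor nova =>
        if nova.length > melhor.length then nova else melhor) caminho
termination_by (linhaDesordenada.filter (fun x => !caminho.contains x)).length
decreasing_by
  have h := pv_mem_candB c.2
  exact pv_measure_lt _ _ h.1 h.2

def ordenaLinhaIt_alt (linhaDesordenada : List (Int × Int)) (anteriores : Option (List (Int × Int))) (inicio : Option (Int × Int)) : List (Int × Int) :=
  let caminho : List (Int × Int) :=
    match anteriores with
    | some a => a
    | none =>
      match inicio with
      | some i => [i]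
      | none => (match PySem.List.pyGet? linhaDesordenada 0 with   -- linhaDesordenada[0]
                 | some i => [i]
                 | none => [])                              -- IndexError, outside Pre_
  pvDfsB linhaDesordenada caminho

-- ===== PRECONDITION & SPEC =====
-- Pre_ excludes exactly the inputs where the Python raises IndexError: anteriores given but
-- empty, or no starting point at all (anteriores and inicio both None and the line empty).
def Pre_ordenaLinhaIt (linhaDesordenada : List (Int × Int)) (anteriores : Option (List (Int × Int))) (inicio : Option (Int × Int)) : Prop :=
  (∀ a, anteriores = some a → a ≠ []) ∧
  (anteriores = none → inicio = none → linhaDesordenada ≠ [])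
instance (linhaDesordenada : List (Int × Int)) (anteriores : Option (List (Int × Int))) (inicio : Option (Int × Int)) : Decidable (Pre_ordenaLinhaIt linhaDesordenada anteriores inicio) := by unfold Pre_ordenaLinhaIt; infer_instance

def pvWitness_ordenaLinhaIt : (List (Int × Int)) × (Option (List (Int × Int))) × (Option (Int × Int)) :=
  ([(0, 0), (1, 1), (2, 1), (1, 0)], none, none)

def Spec_ordenaLinhaIt (linhaDesordenada : List (Int × Int)) (anteriores : Option (List (Int × Int))) (inicio : Option (Int × Int)) (out : List (Int × Int)) : Prop := out = ordenaLinhaIt_alt linhaDesordenada anteriores inicio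
instance (linhaDesordenada : List (Int × Int)) (anteriores : Option (List (Int × Int))) (inicio : Option (Int × Int)) (out : List (Int × Int)) : Decidable (Spec_ordenaLinhaIt linhaDesordenada anteriores inicio out) := by unfold Spec_ordenaLinhaIt; infer_instance

-- ===== CLAIM (what is proved, stated in full; the proofs are below) =====
def Claim_equal_ordenaLinhaIt : Prop := ∀ (linhaDesordenada : List (Int × Int)) (anteriores : Option (List (Int × Int))) (inicio : Option (Int × Int)), Dom_ordenaLinhaIt linhaDesordenada anteriores inicio → Pre_ordenaLinhaIt linhaDesordenada anteriores inicio → Spec_ordenaLinhaIt linhaDesordenada anteriores inicio (ordenaLinhaIt linhaDesordenada anteriores inicio)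

-- ===== LEMMAS AND PROOFS =====

-- A's candidate list equals B's: same neighbours in the same order, same membership test
theorem pv_pontos_eq (L ord : List (Int × Int)) (pt : Int × Int) :
    pvPontosA L ord pt =
      (pvVizinhosB pt).filter (fun q => L.contains q && !ord.contains q) := by
  rw [pvPontosA_eq_filter]
  simp [pvDirsA, pvVizinhosB, sub_eq_add_neg]

-- one-step unfolding of pvDfsB on a nonempty path
theorem pvDfsB_some (L ord : List (Int × Int)) (pt : Int × Int)
    (h : ord.getLast? = some pt) :
    pvDfsB L ord =
      (((pvVizinhosB pt).filter (fun q => L.contains q && !ord.contains q)).attach.map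
          (fun c => pvDfsB L (ord ++ [c.1]))).foldl
        (fun melhor nova => if nova.length > melhor.length then nova else melhor) ord := by
  conv_lhs => rw [pvDfsB]
  rw [h]

-- the best-so-far fold never shortens the accumulator
theorem pv_foldl_best_len (l : List (List (Int × Int))) (init : List (Int × Int)) :
    init.length ≤
      (l.foldl (fun best n => if n.length > best.length then n else best) init).length := by
  induction l generalizing init with
  | nil => exact Nat.le_refl _
  | cons x l ih =>
    simp only [List.foldl_cons]
    by_cases h : x.length > init.length
    · simp only [h, if_true]; exact Nat.le_trans (Nat.le_of_lt h) (ih x)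
    · simp only [h, if_false]; exact ih init

-- the DFS result is at least as long as the path it starts from
theorem pv_dfs_len (L caminho : List (Int × Int)) :
    caminho.length ≤ (pvDfsB L caminho).length := by
  match h : caminho.getLast? with
  | none =>
    have : caminho = [] := List.getLast?_eq_none_iff.mp h
    subst this
    simp
  | some pt => rw [pvDfsB_some L caminho pt h]; exact pv_foldl_best_len _ _

-- core equivalence: A's while-loop equals B's DFS from the same path
theorem pv_loop_eq_dfs (n : Nat) :
    ∀ (L ord : List (Int × Int)) (pt : Int × Int),
      (L.filter (fun x => !ord.contains x)).length ≤ n →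
      ord.getLast? = some pt →
      pvLoopA L ord pt = pvDfsB L ord := by
  induction n with
  | zero =>
    intro L ord pt hn hlast
    have hempty : pvPontosA L ord pt = [] := by
      by_contra hne
      match hcl : pvPontosA L ord pt with
      | [] => exact hne hcl
      | c :: _ =>
        have hc := pv_mem_pontosA (by rw [hcl]; exact List.mem_cons_self ..)
        have hmem : c ∈ L.filter (fun x => !ord.contains x) :=
          List.mem_filter.mpr ⟨hc.1, by simpa using hc.2⟩
        have := List.length_pos_of_mem hmem
        omega
    have hflt : (pvVizinhosB pt).filter (fun q => L.contains q && !ord.contains q) = [] := by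
      rw [← pv_pontos_eq, hempty]
    rw [pvLoopA, pvDfsB_some L ord pt hlast, hflt]
    rw [hempty]
    simp
  | succ n ih =>
    intro L ord pt hn hlast
    rw [pvLoopA, pvDfsB_some L ord pt hlast, ← pv_pontos_eq]
    split
    · next hmatch =>
      rw [hmatch]
      simp
    · next p hmatch =>
      -- exactly one candidate: A walks on, B's fold picks the single (longer) recursive result
      have hp := pv_mem_pontosA (L := L) (ord := ord) (pt := pt) (q := p)
        (by rw [hmatch]; exact List.mem_singleton_self p)
      have hmeas := pv_measure_lt L ord hp.1 hp.2
      have hrec : pvLoopA L (ord ++ [p]) p = pvDfsB L (ord ++ [p]) := by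
        apply ih
        · omega
        · simp
      rw [hmatch]
      simp only [List.attach_cons, List.attach_nil, List.map_nil, List.map_cons,
        List.foldl_cons, List.foldl_nil]
      have hlen : ord.length < (pvDfsB L (ord ++ [p])).length := by
        have := pv_dfs_len L (ord ++ [p])
        simp only [List.length_append, List.length_cons, List.length_nil] at this
        omega
      rw [hrec]
      simp only [gt_iff_lt, hlen, if_true]
    · next p q rest hmatch =>
      -- branching: both sides fold the same recursive results over the same init
      rw [hmatch]
      refine congrArg (List.foldl (fun melhor nova => if nova.length > melhor.length then nova else melhor) ord) (List.map_congr_left ?_)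
      intro c _
      have hc : c.1 ∈ pvPontosA L ord pt := by rw [hmatch]; exact c.2
      have h := pv_mem_pontosA hc
      have hmeas := pv_measure_lt L ord h.1 h.2
      apply ih
      · omega
      · simp

-- ===== VERDICT (by name: the statement is the Claim_ definition above) =====
theorem ordenaLinhaIt_spec : Claim_equal_ordenaLinhaIt := by
  intro L ant ini _ hpre
  unfold Spec_ordenaLinhaIt ordenaLinhaIt ordenaLinhaIt_alt
  obtain ⟨hant, hstart⟩ := hpre
  match ant with
  | some a =>
    have ha : a ≠ [] := hant a rfl
    have hlast : PySem.List.pyGet? a (-1) = a.getLast? := by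
      match a, ha with
      | x :: xs, _ =>
        simp [PySem.List.pyGet?, PySem.List.pyIdx?, List.getLast?_eq_getElem?]
    match ini with
    | some i =>
      simp only [hlast]
      match hl : a.getLast? with
      | none => exact absurd (List.getLast?_eq_none_iff.mp hl) ha
      | some pt => exact pv_loop_eq_dfs _ L a pt (Nat.le_refl _) hl
    | none =>
      simp only [hlast]
      match hl : a.getLast? with
      | none => exact absurd (List.getLast?_eq_none_iff.mp hl) ha
      | some pt => exact pv_loop_eq_dfs _ L a pt (Nat.le_refl _) hl
  | none =>
    match ini with
    | some i =>
      have hlast : PySem.List.pyGet? [i] (-1) = some i := by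
        simp [PySem.List.pyGet?, PySem.List.pyIdx?]
      simp only [hlast]
      exact pv_loop_eq_dfs _ L [i] i (Nat.le_refl _) rfl
    | none =>
      have hL : L ≠ [] := hstart rfl rfl
      match L, hL with
      | x :: xs, _ =>
        have h0 : PySem.List.pyGet? (x :: xs) 0 = some x := by
          simp [PySem.List.pyGet?, PySem.List.pyIdx?]
        have hlast : PySem.List.pyGet? [x] (-1) = some x := by
          simp [PySem.List.pyGet?, PySem.List.pyIdx?]
        simp only [h0, hlast]
        exact pv_loop_eq_dfs _ (x :: xs) [x] x (Nat.le_refl _) rfl
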